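-- pv_equiv track=rewrite | github.com/shepherdjay/reddit_challenges | challenges/challenge355.py | make_pie
-- ===== SOURCE A (Python) =====
-- def make_pie(ingredients_dict, recipe_dict):
--     """
--     Bakes a Pie
--     :param ingredients_dict: Dictionary of current ingredients on hand
--     :param recipe_dict: Dictionary of recipe
--     :return: Tuple of (bool, dict) whether the pie was baked, dictionary of remaining ingredients
--     """
--     remaining_ingredients = {}
--     for ingredient, amount in recipe_dict.items():
--         try:
--             remaining_ingredients[ingredient] = ingredients_dict[ingredient] - amount
--             if remaining_ingredients[ingredient] < 0:
--                 return False, ingredients_dict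
--         except KeyError:
--             return False, ingredients_dict
--     return True, remaining_ingredients
-- ===== SOURCE B (Python) =====
-- def make_pie(ingredients_dict, recipe_dict):
--     """
--     Bakes a Pie
--     :param ingredients_dict: Dictionary of current ingredients on hand
--     :param recipe_dict: Dictionary of recipe
--     :return: Tuple of (bool, dict) whether the pie was baked, dictionary of remaining ingredients
--     """
--     def bake(items):
--         """Recursively consume recipe items; None on failure, else the
--         list of (ingredient, leftover) pairs built on the way back up."""
--         if not items:
--             return []
--         (ingredient, amount), rest = items[0], items[1:]
--         if ingredient not in ingredients_dict:
--             return None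
--         left = ingredients_dict[ingredient] - amount
--         if left < 0:
--             return None
--         tail = bake(rest)
--         if tail is None:
--             return None
--         return [(ingredient, left)] + tail
--
--     pairs = bake(list(recipe_dict.items()))
--     if pairs is None:
--         return False, ingredients_dict
--     return True, dict(pairs)
-- ===== Notes on version B (the rewrite author's own statement) =====
-- stated objective: alternative
-- what changed: A's imperative loop that mutates a remainder dict and early-returns is replaced by a recursive Option-returning helper that consumes the recipe item list and assembles the leftover pairs on the way back up the recursion, with the dict built once at the end from those pairs.
import Mathlib
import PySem

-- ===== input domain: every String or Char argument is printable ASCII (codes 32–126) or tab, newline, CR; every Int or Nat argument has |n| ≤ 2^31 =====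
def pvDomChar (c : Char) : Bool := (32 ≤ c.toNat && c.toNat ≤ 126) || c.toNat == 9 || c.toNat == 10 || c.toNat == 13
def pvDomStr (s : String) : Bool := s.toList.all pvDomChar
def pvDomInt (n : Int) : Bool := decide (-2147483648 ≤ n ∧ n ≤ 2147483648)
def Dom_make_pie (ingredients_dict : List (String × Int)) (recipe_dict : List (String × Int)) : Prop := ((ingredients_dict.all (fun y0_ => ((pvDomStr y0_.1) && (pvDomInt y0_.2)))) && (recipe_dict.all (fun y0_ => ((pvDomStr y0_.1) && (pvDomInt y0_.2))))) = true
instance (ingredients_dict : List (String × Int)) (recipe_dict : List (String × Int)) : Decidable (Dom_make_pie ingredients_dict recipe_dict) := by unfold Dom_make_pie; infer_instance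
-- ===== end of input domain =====

-- B replaces A's mutating loop by a recursive Option-returning helper that builds the leftover pairs on the way back up, then makes the dict once (objective: alternative).


-- ===== PORT A =====
-- A's for-loop with early returns: builds remaining_ingredients while scanning recipe items.
def pieLoopA (ing : PySem.Dict String Int) (orig : List (String × Int))
    (rem : PySem.Dict String Int) : List (String × Int) → Bool × (List (String × Int))
  | [] => (true, rem.items)
  | (k, a) :: rest =>
    match ing.get? k with
    | none => (false, orig)                    -- KeyError branch
    | some v =>
      let rem' := rem.insert k (v - a)
      if rem'.getD k 0 < 0 then (false, orig)  -- remaining_ingredients[ingredient] < 0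
      else pieLoopA ing orig rem' rest

def make_pie (ingredients_dict : List (String × Int)) (recipe_dict : List (String × Int)) : Bool × (List (String × Int)) :=
  let ing := PySem.Dict.ofList ingredients_dict
  pieLoopA ing ing.items PySem.Dict.empty (PySem.Dict.ofList recipe_dict).items

-- ===== PORT B =====
-- B's recursive helper 'bake': none on failure, else the leftover pairs built on the way back up.
def bakeB (ing : PySem.Dict String Int) : List (String × Int) → Option (List (String × Int))
  | [] => some []
  | (k, a) :: rest =>
    if !(ing.contains k) then none
    else
      let left := ing.getD k 0 - a
      if left < 0 then none
      else
        match bakeB ing rest with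
        | none => none
        | some tail => some ((k, left) :: tail)

def make_pie_alt (ingredients_dict : List (String × Int)) (recipe_dict : List (String × Int)) : Bool × (List (String × Int)) :=
  match bakeB (PySem.Dict.ofList ingredients_dict) (PySem.Dict.ofList recipe_dict).items with
  | none => (false, (PySem.Dict.ofList ingredients_dict).items)
  | some pairs => (true, (PySem.Dict.ofList pairs).items)   -- dict(pairs)

-- ===== PRECONDITION & SPEC =====
def Spec_make_pie (ingredients_dict : List (String × Int)) (recipe_dict : List (String × Int)) (out : Bool × (List (String × Int))) : Prop := out = make_pie_alt ingredients_dict recipe_dict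
instance (ingredients_dict : List (String × Int)) (recipe_dict : List (String × Int)) (out : Bool × (List (String × Int))) : Decidable (Spec_make_pie ingredients_dict recipe_dict out) := by unfold Spec_make_pie; infer_instance

-- ===== CLAIM (what is proved, stated in full; the proofs are below) =====
def Claim_equal_make_pie : Prop := ∀ (ingredients_dict : List (String × Int)) (recipe_dict : List (String × Int)), Dom_make_pie ingredients_dict recipe_dict → Spec_make_pie ingredients_dict recipe_dict (make_pie ingredients_dict recipe_dict)

-- ===== LEMMAS AND PROOFS =====

-- B's recursion computes: none iff some recipe item fails, else the map of leftovers.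
theorem bakeB_eq (ing : PySem.Dict String Int) (l : List (String × Int)) :
    bakeB ing l =
      if l.any (fun p => !(ing.contains p.1) || decide (ing.getD p.1 0 - p.2 < 0))
      then none
      else some (l.map (fun p => (p.1, ing.getD p.1 0 - p.2))) := by
  induction l with
  | nil => simp [bakeB]
  | cons p rest ih =>
    obtain ⟨k, a⟩ := p
    cases hR : rest.any (fun p => !(ing.contains p.1) || decide (ing.getD p.1 0 - p.2 < 0)) with
    | true =>
      simp only [bakeB, ih, hR]
      simp
      simp at hR
      obtain ⟨x, y, hxy, h⟩ := hR
      exact fun _ _ => ⟨x, y, hxy, fun hcx => h.resolve_left (by simp [hcx])⟩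
    | false =>
      simp only [bakeB, ih, hR]
      simp at hR
      by_cases hc : ing.contains k = true <;>
        by_cases hneg : ing.getD k 0 - a < 0 <;>
          simp [hc, hneg]
      all_goals exact hR

-- dict(pairs) returns the pairs themselves when keys are distinct (generalized over the foldl's accumulator).
theorem items_foldl_insert (l : List (String × Int)) (d : PySem.Dict String Int)
    (hnd : (l.map Prod.fst).Nodup)
    (hfresh : ∀ k ∈ l.map Prod.fst, d.contains k = false) :
    (l.foldl (fun d p => d.insert p.1 p.2) d).items = d.items ++ l := by
  induction l generalizing d with
  | nil => simp
  | cons p rest ih =>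
    obtain ⟨k, v⟩ := p
    simp only [List.map_cons, List.nodup_cons] at hnd
    have hkfresh : d.contains k = false := hfresh k (by simp)
    have hitems : (d.insert k v).items = d.items ++ [(k, v)] :=
      PySem.Dict.items_insert_of_not_contains d v hkfresh
    have := ih (d.insert k v) hnd.2 (by
      intro k' hk'
      have hne : k' ≠ k := by rintro rfl; exact hnd.1 hk'
      rw [PySem.Dict.contains_insert]
      simp [hne, hfresh k' (by simp [hk'])])
    simp [List.foldl_cons, this, hitems]

theorem items_ofList_of_nodup (l : List (String × Int)) (hnd : (l.map Prod.fst).Nodup) :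
    (PySem.Dict.ofList l).items = l := by
  have h : PySem.Dict.ofList l = l.foldl (fun d p => d.insert p.1 p.2) PySem.Dict.empty := rfl
  rw [h, items_foldl_insert l PySem.Dict.empty hnd
    (by intro k _; simp [PySem.Dict.contains_empty])]
  simp [PySem.Dict.empty]

-- Loop invariant for A: with fresh, distinct remaining keys, A's loop equals check-then-map.
theorem pieLoopA_eq (ing : PySem.Dict String Int) (orig : List (String × Int))
    (l : List (String × Int)) (rem : PySem.Dict String Int)
    (hnd : (l.map Prod.fst).Nodup) (hnodk : rem.keys.Nodup)
    (hfresh : ∀ k ∈ l.map Prod.fst, rem.contains k = false) :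
    pieLoopA ing orig rem l =
      if l.any (fun p => !(ing.contains p.1) || decide (ing.getD p.1 0 - p.2 < 0))
      then (false, orig)
      else (true, rem.items ++ l.map (fun p => (p.1, ing.getD p.1 0 - p.2))) := by
  induction l generalizing rem with
  | nil => simp [pieLoopA]
  | cons p rest ih =>
    obtain ⟨k, a⟩ := p
    simp only [List.map_cons, List.nodup_cons] at hnd
    have hkfresh : rem.contains k = false := hfresh k (by simp)
    cases hget : ing.get? k with
    | none =>
      have hc : ing.contains k = false := by
        rw [PySem.Dict.contains_eq_isSome_get?, hget]; rfl
      simp [pieLoopA, hget, hc]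
    | some v =>
      have hc : ing.contains k = true := by
        rw [PySem.Dict.contains_eq_isSome_get?, hget]; rfl
      have hgd : ing.getD k 0 = v := PySem.Dict.getD_of_get?_eq_some ing 0 hget
      by_cases hneg : v - a < 0
      · simp [pieLoopA, hget, PySem.Dict.getD_insert_self, hneg, hc, hgd]
      · have hrec := ih (rem.insert k (v - a)) hnd.2
          (PySem.Dict.nodup_keys_insert rem k (v - a) hnodk)
          (by
            intro k' hk'
            have hne : k' ≠ k := by rintro rfl; exact hnd.1 hk'
            rw [PySem.Dict.contains_insert]
            simp [hne, hfresh k' (by simp [hk'])])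
        have hitems : (rem.insert k (v - a)).items = rem.items ++ [(k, v - a)] :=
          PySem.Dict.items_insert_of_not_contains rem (v - a) hkfresh
        simp only [pieLoopA, hget, PySem.Dict.getD_insert_self, if_neg hneg, hrec, hitems,
          List.any_cons, hc, hgd]
        simp only [Bool.not_true, Bool.false_or, decide_eq_false hneg]
        simp [hgd]

theorem make_pie_spec : Claim_equal_make_pie := by
  intro ing rec _
  unfold Spec_make_pie make_pie make_pie_alt
  have hnd : ((PySem.Dict.ofList rec).items.map Prod.fst).Nodup :=
    PySem.Dict.nodup_keys_ofList rec
  rw [pieLoopA_eq _ _ _ _ hnd (by simp [PySem.Dict.keys_empty])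
      (by intro k _; simp [PySem.Dict.contains_empty]),
    bakeB_eq]
  have hmap : (PySem.Dict.ofList (((PySem.Dict.ofList rec).items).map
        (fun p => (p.1, (PySem.Dict.ofList ing).getD p.1 0 - p.2)))).items =
      ((PySem.Dict.ofList rec).items).map
        (fun p => (p.1, (PySem.Dict.ofList ing).getD p.1 0 - p.2)) :=
    items_ofList_of_nodup _ (by
      simpa [List.map_map, Function.comp] using hnd)
  by_cases hany : ((PySem.Dict.ofList rec).items).any
      (fun p => !((PySem.Dict.ofList ing).contains p.1) ||
        decide ((PySem.Dict.ofList ing).getD p.1 0 - p.2 < 0)) = true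
  · rw [if_pos hany, if_pos hany]
  · have hb : ((PySem.Dict.ofList rec).items).any
        (fun p => !((PySem.Dict.ofList ing).contains p.1) ||
          decide ((PySem.Dict.ofList ing).getD p.1 0 - p.2 < 0)) = false :=
      Bool.eq_false_iff.mpr hany
    rw [if_neg hany, if_neg hany]
    simp [hmap, PySem.Dict.empty]
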